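-- pv_equiv track=rewrite | github.com/thepurpleowl/House-of-Codes | LeetCode/most_beutiful_item_for_each_query.py | get_search_key
-- ===== SOURCE A (Python) =====
-- def get_search_key(sorted_item_keys, q):
--     l, h = 0, len(sorted_item_keys) -1
--     result = None
--     while l <= h:
--         mid = (l+h)//2
--         if sorted_item_keys[mid] <= q:
--             result = sorted_item_keys[mid]
--             l = mid + 1
--         else:
--             h = mid - 1
--     return result
-- ===== SOURCE B (Python) =====
-- def get_search_key(sorted_item_keys, q):
--     # Segment-recursive binary search: recurse on slices instead of index
--     # bounds, returning the match found deepest on the probe path.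
--     def go(seg):
--         if not seg:
--             return None
--         mid = (len(seg) - 1) // 2
--         if seg[mid] <= q:
--             r = go(seg[mid + 1:])
--             return r if r is not None else seg[mid]
--         return go(seg[:mid])
--     return go(sorted_item_keys)
-- ===== Notes on version B (the rewrite author's own statement) =====
-- stated objective: alternative
-- what changed: Replaces the iterative two-index (l,h,result) while-loop with a recursion on list slices: the helper recurses on seg[mid+1:] or seg[:mid] and propagates the deepest match back up instead of threading a result accumulator.
import Mathlib
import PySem

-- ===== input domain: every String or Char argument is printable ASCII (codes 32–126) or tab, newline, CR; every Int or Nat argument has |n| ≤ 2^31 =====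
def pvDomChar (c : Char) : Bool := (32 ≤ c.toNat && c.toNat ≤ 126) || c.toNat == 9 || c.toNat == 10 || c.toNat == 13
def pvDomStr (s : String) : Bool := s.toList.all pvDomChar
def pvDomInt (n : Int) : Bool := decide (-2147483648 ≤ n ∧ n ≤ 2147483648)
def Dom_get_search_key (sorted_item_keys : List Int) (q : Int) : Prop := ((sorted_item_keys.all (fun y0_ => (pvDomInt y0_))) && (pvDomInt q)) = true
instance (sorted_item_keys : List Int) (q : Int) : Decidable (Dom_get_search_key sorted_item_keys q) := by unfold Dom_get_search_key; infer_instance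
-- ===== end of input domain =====

-- B replaces A's iterative (l, h, result) while-loop by a recursion on list
-- slices that propagates the deepest match back up (alternative decomposition,
-- same probe sequence; return values proved equal on all inputs).

-- ===== PORT A =====
-- the while-loop of A, state (l, h, result)
def pvLoopA (keys : List Int) (q : Int) (l h : Int) (result : Option Int) : Option Int :=
  if hlh : l ≤ h then
    let mid := PySem.Int.floordiv (l + h) 2
    match PySem.List.pyGet? keys mid with
    | none => none   -- IndexError; unreachable from A's initial state (0 ≤ l, h < len is invariant)
    | some v =>
      if v ≤ q then pvLoopA keys q (mid + 1) h (some v)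
      else pvLoopA keys q l (mid - 1) result
  else result
termination_by (h + 1 - l).toNat
decreasing_by
  · have hb := PySem.Int.floordiv_two_mid_bounds hlh
    have := PySem.Int.floordiv_eq_ediv_of_pos (a := l + h) (b := 2) (by omega)
    omega
  · have hb := PySem.Int.floordiv_two_mid_bounds hlh
    have := PySem.Int.floordiv_eq_ediv_of_pos (a := l + h) (b := 2) (by omega)
    omega

def get_search_key (sorted_item_keys : List Int) (q : Int) : Option Int :=
  pvLoopA sorted_item_keys q 0 ((sorted_item_keys.length : Int) - 1) none

-- ===== PORT B =====
-- B's inner helper go(seg); Python's seg[mid] with 0 ≤ mid < len(seg) is exact as getD,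
-- and the nonnegative in-range slices seg[mid+1:] / seg[:mid] are exact as drop/take.
def pvGoAlt (q : Int) (seg : List Int) : Option Int :=
  if seg.length = 0 then none
  else
    let mid := (seg.length - 1) / 2
    let v := seg.getD mid 0
    if v ≤ q then
      match pvGoAlt q (seg.drop (mid + 1)) with
      | some r => some r
      | none => some v
    else pvGoAlt q (seg.take mid)
termination_by seg.length
decreasing_by
  · simp only [List.length_drop]; omega
  · simp only [List.length_take]; omega

def get_search_key_alt (sorted_item_keys : List Int) (q : Int) : Option Int :=
  pvGoAlt q sorted_item_keys

-- ===== PRECONDITION & SPEC =====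
def Spec_get_search_key (sorted_item_keys : List Int) (q : Int) (out : Option Int) : Prop := out = get_search_key_alt sorted_item_keys q
instance (sorted_item_keys : List Int) (q : Int) (out : Option Int) : Decidable (Spec_get_search_key sorted_item_keys q out) := by unfold Spec_get_search_key; infer_instance

-- ===== CLAIM (what is proved, stated in full; the proofs are below) =====
def Claim_equal_get_search_key : Prop := ∀ (sorted_item_keys : List Int) (q : Int), Dom_get_search_key sorted_item_keys q → Spec_get_search_key sorted_item_keys q (get_search_key sorted_item_keys q)

-- ===== LEMMAS AND PROOFS =====

-- A's loop on bounds [l, h] computes B's recursion on the slice keys[l : h+1],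
-- with a pending accumulator r replaced on any match found.
theorem pvLoopA_eq_goAlt (keys : List Int) (q : Int) :
    ∀ n l h (r : Option Int), (h + 1 - l).toNat = n → 0 ≤ l → h < (keys.length : Int) →
      pvLoopA keys q l h r =
        (match pvGoAlt q ((keys.drop l.toNat).take n) with
         | some v => some v
         | none => r) := by
  intro n
  induction n using Nat.strong_induction_on with
  | _ n ih =>
    intro l h r hn hl hh
    rw [pvLoopA]
    by_cases hlh : l ≤ h
    · have hn1 : 1 ≤ n := by omega
      have hb := PySem.Int.floordiv_two_mid_bounds hlh
      have hfd := PySem.Int.floordiv_eq_ediv_of_pos (a := l + h) (b := 2) (by omega : (0:Int) < 2)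
      set mid := PySem.Int.floordiv (l + h) 2 with hmiddef
      set a := l.toNat with ha
      set m := (n - 1) / 2 with hm
      have hseglen : ((keys.drop a).take n).length = n := by
        simp [List.length_take, List.length_drop]; omega
      have hmidnat : mid.toNat = a + m := by omega
      have hget : PySem.List.pyGet? keys mid = some (keys[mid.toNat]'(by omega)) := by
        apply PySem.List.pyGet?_eq_some_getElem <;> omega
      rw [dif_pos hlh]
      simp only [hget]
      conv_rhs => rw [pvGoAlt]
      rw [if_neg (show ¬((List.take n (List.drop a keys)).length = 0) by omega)]
      simp only [hseglen]
      have hv : ((keys.drop a).take n).getD ((n - 1) / 2) 0 = keys[mid.toNat]'(by omega) := by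
        rw [List.getD_eq_getElem?_getD]
        rw [List.getElem?_take_of_lt (by omega), List.getElem?_drop]
        simp only [hmidnat, ← hm]
        rw [List.getElem?_eq_getElem (by omega)]
        rfl
      rw [hv]
      by_cases hvq : keys[mid.toNat]'(by omega) ≤ q
      · rw [if_pos hvq, if_pos hvq]
        have hdrop : ((keys.drop a).take n).drop ((n - 1) / 2 + 1)
            = (keys.drop (mid + 1).toNat).take ((h + 1 - (mid + 1)).toNat) := by
          rw [List.drop_take, List.drop_drop]
          congr 1
          · omega
          · congr 1; omega
        rw [hdrop]
        have hrec := ih ((h + 1 - (mid + 1)).toNat) (by omega) (mid + 1) h (some (keys[mid.toNat]'(by omega)))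
          rfl (by omega) hh
        rw [hrec]
        cases pvGoAlt q ((keys.drop (mid + 1).toNat).take ((h + 1 - (mid + 1)).toNat)) <;> rfl
      · rw [if_neg hvq, if_neg hvq]
        have htake : ((keys.drop a).take n).take ((n - 1) / 2)
            = (keys.drop l.toNat).take ((mid - 1 + 1 - l).toNat) := by
          rw [List.take_take]
          congr 1
          omega
        rw [htake]
        exact ih ((mid - 1 + 1 - l).toNat) (by omega) l (mid - 1) r rfl hl (by omega)
    · rw [dif_neg hlh]
      have : n = 0 := by omega
      subst this
      simp [pvGoAlt]

-- ===== VERDICT (by name: the statement is the Claim_ definition above) =====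
theorem get_search_key_spec : Claim_equal_get_search_key := by
  intro keys q _
  unfold Spec_get_search_key get_search_key get_search_key_alt
  have h := pvLoopA_eq_goAlt keys q keys.length 0 ((keys.length : Int) - 1) none
    (by omega) (by omega) (by omega)
  simp only [Int.toNat_zero, List.drop_zero, List.take_length] at h
  rw [h]
  cases pvGoAlt q keys <;> rfl
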